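-- pv_equiv track=rewrite | github.com/ehiggins98/AdventOfCode | day_6.py | remove_infinite
-- ===== SOURCE A (Python) =====
-- import copy
--
-- def get_closest(x, y, coordinates):
--     min_dist = 1000
--     argmin = []
--     for c in coordinates:
--         if abs(x - c[0]) + abs(y - c[1]) < min_dist:
--             min_dist = abs(x - c[0]) + abs(y - c[1])
--             argmin = [c]
--         elif abs(x - c[0]) + abs(y - c[1]) == min_dist:
--             argmin.append(c)
--     return argmin[0] if len(argmin) == 1 else None
--
-- def remove_infinite(coordinates):
--     orig = copy.deepcopy(coordinates)
--     for x in range(-1, 401):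
--         closest = get_closest(x, -1, orig)
--         if closest in coordinates:
--             coordinates.remove(closest)
--     for x in range(-1, 401):
--         closest = get_closest(x, 401, orig)
--         if closest in coordinates:
--             coordinates.remove(closest)
--     for y in range(-1, 400):
--         closest = get_closest(-1, y, orig)
--         if closest in coordinates:
--             coordinates.remove(closest)
--     for y in range(-1, 400):
--         closest = get_closest(401, y, orig)
--         if closest in coordinates:
--             coordinates.remove(closest)
--
--     return coordinates
-- ===== SOURCE B (Python) =====
-- import copy
--
-- def get_closest(x, y, coordinates):
--     min_dist = 1000
--     argmin = []
--     for c in coordinates: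
--         if abs(x - c[0]) + abs(y - c[1]) < min_dist:
--             min_dist = abs(x - c[0]) + abs(y - c[1])
--             argmin = [c]
--         elif abs(x - c[0]) + abs(y - c[1]) == min_dist:
--             argmin.append(c)
--     return argmin[0] if len(argmin) == 1 else None
--
-- def remove_infinite(coordinates):
--     orig = copy.deepcopy(coordinates)
--     border = (
--         [(x, -1) for x in range(-1, 401)]
--         + [(x, 401) for x in range(-1, 401)]
--         + [(-1, y) for y in range(-1, 400)]
--         + [(401, y) for y in range(-1, 400)]
--     )
--     infinite = [get_closest(x, y, orig) for (x, y) in border]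
--     coordinates[:] = [c for c in coordinates if c not in infinite]
--     return coordinates
-- ===== Notes on version B (the rewrite author's own statement) =====
-- stated objective: simpler
-- what changed: Instead of four scan-and-remove-during-iteration loops, B builds the list of all border points once, maps get_closest over it to obtain the set of border-touching candidates, and removes them with a single in-place filtering pass (coordinates[:] = ...).
import Mathlib
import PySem

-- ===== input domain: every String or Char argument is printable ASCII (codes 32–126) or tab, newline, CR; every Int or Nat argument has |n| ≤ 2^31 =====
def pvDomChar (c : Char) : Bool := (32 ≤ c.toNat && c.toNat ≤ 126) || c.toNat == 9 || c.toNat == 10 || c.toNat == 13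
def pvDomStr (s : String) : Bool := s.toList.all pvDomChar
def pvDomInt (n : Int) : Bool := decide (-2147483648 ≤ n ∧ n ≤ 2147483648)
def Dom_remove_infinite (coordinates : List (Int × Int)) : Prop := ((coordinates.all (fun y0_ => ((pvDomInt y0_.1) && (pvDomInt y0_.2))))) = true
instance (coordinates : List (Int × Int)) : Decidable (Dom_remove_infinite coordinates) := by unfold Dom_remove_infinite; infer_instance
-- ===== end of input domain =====

-- B replaces A's four remove-during-scan border loops by building the list of border points once,
-- mapping get_closest over it, and removing the hit coordinates in one filtering pass (simpler; same cost).
-- A mutates its argument in place (list.remove); the equivalence proved here is about the return value only.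


-- ===== PORT A =====
-- shared helper of Source A and Source B (Source B keeps get_closest unchanged)
def get_closest (x y : Int) (coordinates : List (Int × Int)) : Option (Int × Int) :=
  let st := coordinates.foldl (fun (s : Int × List (Int × Int)) c =>
    if |x - c.1| + |y - c.2| < s.1 then (|x - c.1| + |y - c.2|, [c])
    else if |x - c.1| + |y - c.2| = s.1 then (s.1, s.2 ++ [c])
    else s) (1000, [])
  if st.2.length = 1 then st.2.head? else none

-- 'closest = …; if closest in coordinates: coordinates.remove(closest)'  (None is never in a list of pairs)
def tryRemove (cur : List (Int × Int)) (closest : Option (Int × Int)) : List (Int × Int) :=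
  match closest with
  | none => cur
  | some c => if c ∈ cur then (PySem.List.remove? cur c).getD cur else cur

def remove_infinite (coordinates : List (Int × Int)) : List (Int × Int) :=
  let orig := coordinates
  let c1 := (PySem.List.pyRange (-1) 401 1).foldl (fun cur x => tryRemove cur (get_closest x (-1) orig)) coordinates
  let c2 := (PySem.List.pyRange (-1) 401 1).foldl (fun cur x => tryRemove cur (get_closest x 401 orig)) c1
  let c3 := (PySem.List.pyRange (-1) 400 1).foldl (fun cur y => tryRemove cur (get_closest (-1) y orig)) c2
  let c4 := (PySem.List.pyRange (-1) 400 1).foldl (fun cur y => tryRemove cur (get_closest 401 y orig)) c3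
  c4

-- ===== PORT B =====
def remove_infinite_alt (coordinates : List (Int × Int)) : List (Int × Int) :=
  let orig := coordinates
  let border :=
    (PySem.List.pyRange (-1) 401 1).map (fun x => (x, (-1 : Int)))
    ++ (PySem.List.pyRange (-1) 401 1).map (fun x => (x, (401 : Int)))
    ++ (PySem.List.pyRange (-1) 400 1).map (fun y => ((-1 : Int), y))
    ++ (PySem.List.pyRange (-1) 400 1).map (fun y => ((401 : Int), y))
  let infinite := border.map (fun p => get_closest p.1 p.2 orig)
  coordinates.filter (fun c => !(infinite.contains (some c)))

-- ===== PRECONDITION & SPEC =====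
def Spec_remove_infinite (coordinates : List (Int × Int)) (out : List (Int × Int)) : Prop := out = remove_infinite_alt coordinates
instance (coordinates : List (Int × Int)) (out : List (Int × Int)) : Decidable (Spec_remove_infinite coordinates out) := by unfold Spec_remove_infinite; infer_instance

-- ===== CLAIM (what is proved, stated in full; the proofs are below) =====
def Claim_equal_remove_infinite : Prop := ∀ (coordinates : List (Int × Int)), Dom_remove_infinite coordinates → Spec_remove_infinite coordinates (remove_infinite coordinates)

-- ===== LEMMAS AND PROOFS =====

-- proof-side name for the body of get_closest's fold
def gcStep (x y : Int) (s : Int × List (Int × Int)) (c : Int × Int) : Int × List (Int × Int) :=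
  if |x - c.1| + |y - c.2| < s.1 then (|x - c.1| + |y - c.2|, [c])
  else if |x - c.1| + |y - c.2| = s.1 then (s.1, s.2 ++ [c])
  else s

-- invariant of get_closest's fold: the final min is ≤ the initial one, and the multiplicity of any
-- point in the final argmin is: all its occurrences in the scanned list (plus the initial argmin if
-- the min never improved) if it sits at the final min distance, and 0 otherwise.
theorem gc_fold_count (x y : Int) :
    ∀ (l : List (Int × Int)) (md : Int) (am : List (Int × Int)),
      (∀ e ∈ am, |x - e.1| + |y - e.2| = md) →
      (l.foldl (gcStep x y) (md, am)).1 ≤ md ∧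
      ∀ c, (l.foldl (gcStep x y) (md, am)).2.count c =
        if |x - c.1| + |y - c.2| = (l.foldl (gcStep x y) (md, am)).1
        then l.count c + (if (l.foldl (gcStep x y) (md, am)).1 = md then am.count c else 0)
        else 0 := by
  intro l
  induction l with
  | nil =>
    intro md am ham
    refine ⟨le_refl _, fun c => ?_⟩
    simp only [List.foldl_nil, List.count_nil]
    by_cases h : |x - c.1| + |y - c.2| = md
    · simp [h]
    · have : c ∉ am := fun hc => h (ham c hc)
      simp [h, List.count_eq_zero.mpr this]
  | cons e l ih =>
    intro md am ham
    have hstep : (e :: l).foldl (gcStep x y) (md, am) = l.foldl (gcStep x y) (gcStep x y (md, am) e) :=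
      List.foldl_cons ..
    by_cases h1 : |x - e.1| + |y - e.2| < md
    · have hg : gcStep x y (md, am) e = (|x - e.1| + |y - e.2|, [e]) := by
        simp [gcStep, h1]
      obtain ⟨hle, hcount⟩ := ih (|x - e.1| + |y - e.2|) [e]
        (by intro f hf; simp at hf; subst hf; rfl)
      rw [hstep, hg]
      refine ⟨le_of_lt (lt_of_le_of_lt hle h1), fun c => ?_⟩
      rw [hcount c]
      set r := l.foldl (gcStep x y) (|x - e.1| + |y - e.2|, [e]) with hr
      have hne : r.1 ≠ md := by omega
      by_cases hd : |x - c.1| + |y - c.2| = r.1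
      · simp only [if_pos hd, if_neg hne, List.count_cons]
        by_cases hce : e = c
        · subst hce
          have : r.1 = |x - e.1| + |y - e.2| := by omega
          simp [this]
        · have hnm : ¬ (r.1 = |x - e.1| + |y - e.2| ∧ e = c) := fun h => hce h.2
          by_cases hm : r.1 = |x - e.1| + |y - e.2|
          · simp [hm, hce, beq_iff_eq]
          · simp [hm, hce, beq_iff_eq]
      · simp [hd]
    · by_cases h2 : |x - e.1| + |y - e.2| = md
      · have hg : gcStep x y (md, am) e = (md, am ++ [e]) := by
          simp [gcStep, h2]
        obtain ⟨hle, hcount⟩ := ih md (am ++ [e]) (by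
          intro f hf
          rcases List.mem_append.mp hf with hf | hf
          · exact ham f hf
          · simp at hf; subst hf; exact h2)
        rw [hstep, hg]
        refine ⟨hle, fun c => ?_⟩
        rw [hcount c]
        set r := l.foldl (gcStep x y) (md, am ++ [e]) with hr
        by_cases hd : |x - c.1| + |y - c.2| = r.1
        · by_cases hm : r.1 = md
          · simp only [if_pos hd, if_pos hm, List.count_append, List.count_cons]
            by_cases hce : e = c
            · subst hce
              simp
              omega
            · simp [hce, beq_iff_eq]
          · have hce : e ≠ c := by
              intro h; subst h
              exact hm (by omega)
            simp only [if_pos hd, if_neg hm, List.count_cons]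
            simp
            exact hce
        · simp [hd]
      · have hg : gcStep x y (md, am) e = (md, am) := by
          simp [gcStep, h1, h2]
        obtain ⟨hle, hcount⟩ := ih md am ham
        rw [hstep, hg]
        refine ⟨hle, fun c => ?_⟩
        rw [hcount c]
        set r := l.foldl (gcStep x y) (md, am) with hr
        by_cases hd : |x - c.1| + |y - c.2| = r.1
        · have hce : e ≠ c := by
            intro h; subst h; omega
          simp only [if_pos hd, List.count_cons]
          simp
          exact hce
        · simp [hd]

-- if get_closest returns some c, then c occurs exactly once in the list
theorem gc_some_count (x y : Int) (l : List (Int × Int)) (c : Int × Int)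
    (h : get_closest x y l = some c) : l.count c = 1 := by
  unfold get_closest at h
  obtain ⟨_, hcount⟩ := gc_fold_count x y l 1000 [] (by simp)
  have hfold : l.foldl (fun (s : Int × List (Int × Int)) c =>
      if |x - c.1| + |y - c.2| < s.1 then (|x - c.1| + |y - c.2|, [c])
      else if |x - c.1| + |y - c.2| = s.1 then (s.1, s.2 ++ [c])
      else s) (1000, []) = l.foldl (gcStep x y) (1000, []) := rfl
  rw [hfold] at h
  set st := l.foldl (gcStep x y) (1000, []) with hst
  by_cases hlen : st.2.length = 1
  · simp only [if_pos hlen] at h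
    have hc2 : st.2 = [c] := by
      match h2 : st.2, hlen with
      | [a], _ => simp [h2] at h; simp [h]
    have := hcount c
    rw [hc2] at this
    simp only [List.count_singleton] at this
    by_cases hd : |x - c.1| + |y - c.2| = st.1
    · simp [hd] at this; omega
    · simp [hd] at this
  · simp [hlen] at h

-- erasing the first occurrence = filtering, when the element occurs at most once
theorem erase_eq_filter_of_count_le_one (l : List (Int × Int)) (c : Int × Int)
    (h : l.count c ≤ 1) : l.erase c = l.filter (fun d => !(d == c)) := by
  induction l with
  | nil => rfl
  | cons a l ih =>
    by_cases hac : a = c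
    · subst hac
      rw [List.erase_cons_head]
      simp only [List.count_cons_self] at h
      have hz : l.count a = 0 := by omega
      have hnotmem : a ∉ l := List.count_eq_zero.mp hz
      have hfl : l.filter (fun d => !(d == a)) = l := by
        apply List.filter_eq_self.mpr
        intro d hd
        simp
        intro hda; subst hda; exact hnotmem hd
      simp [hfl]
    · rw [List.erase_cons_tail (by simp [beq_iff_eq, hac])]
      have h' : l.count c ≤ 1 := by
        simp only [List.count_cons] at h
        omega
      rw [ih h']
      simp [hac]

-- one border point: removing on a filtered list = strengthening the filter
theorem step_filter (x y : Int) (orig : List (Int × Int)) (q : (Int × Int) → Bool) :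
    tryRemove (orig.filter q) (get_closest x y orig)
    = orig.filter (fun c => q c && !((some c : Option (Int × Int)) == get_closest x y orig)) := by
  cases h : get_closest x y orig with
  | none =>
    simp only [tryRemove]
    apply (List.filter_congr ?_).symm
    intro c _; simp
  | some c0 =>
    have hcount : orig.count c0 = 1 := gc_some_count x y orig c0 h
    have hrhs : orig.filter (fun c => q c && !((some c : Option (Int × Int)) == some c0))
        = (orig.filter q).filter (fun c => !(c == c0)) := by
      rw [List.filter_filter]
      apply List.filter_congr
      intro c _
      by_cases hc : c = c0 <;> simp [hc, Bool.and_comm]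
    simp only [tryRemove, hrhs]
    by_cases hmem : c0 ∈ orig.filter q
    · rw [if_pos hmem, PySem.List.remove?_eq_some_erase _ _ hmem, Option.getD_some]
      exact erase_eq_filter_of_count_le_one _ _
        (le_trans (List.Sublist.count_le c0 (List.filter_sublist)) (le_of_eq hcount))
    · rw [if_neg hmem]
      symm
      apply List.filter_eq_self.mpr
      intro d hd
      simp
      intro hdc; subst hdc; exact hmem hd

-- folding tryRemove over a list of border points = filtering out all their closest hits
theorem fold_filter (orig : List (Int × Int)) :
    ∀ (pts : List (Int × Int)) (q : (Int × Int) → Bool),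
      pts.foldl (fun cur p => tryRemove cur (get_closest p.1 p.2 orig)) (orig.filter q)
      = orig.filter (fun c => q c && !((pts.map (fun p => get_closest p.1 p.2 orig)).contains (some c))) := by
  intro pts
  induction pts with
  | nil =>
    intro q
    simp only [List.foldl_nil, List.map_nil]
    apply (List.filter_congr ?_).symm
    intro c _; simp
  | cons p pts ih =>
    intro q
    simp only [List.foldl_cons]
    rw [step_filter p.1 p.2 orig q, ih]
    apply List.filter_congr
    intro c _
    simp only [List.map_cons, List.contains_cons, Bool.not_or, Bool.and_assoc]

-- the four border passes, specialized to the exact loop shapes of port A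
theorem pass_x (orig : List (Int × Int)) (b yv : Int) (q : (Int × Int) → Bool) :
    (PySem.List.pyRange (-1) b 1).foldl
      (fun cur x => tryRemove cur (get_closest x yv orig)) (orig.filter q)
    = orig.filter (fun c => q c &&
        !(((PySem.List.pyRange (-1) b 1).map (fun x => get_closest x yv orig)).contains (some c))) := by
  have h := fold_filter orig ((PySem.List.pyRange (-1) b 1).map (fun x => (x, yv))) q
  rw [List.foldl_map, List.map_map] at h
  simpa using h

theorem pass_y (orig : List (Int × Int)) (b xv : Int) (q : (Int × Int) → Bool) :
    (PySem.List.pyRange (-1) b 1).foldl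
      (fun cur y => tryRemove cur (get_closest xv y orig)) (orig.filter q)
    = orig.filter (fun c => q c &&
        !(((PySem.List.pyRange (-1) b 1).map (fun y => get_closest xv y orig)).contains (some c))) := by
  have h := fold_filter orig ((PySem.List.pyRange (-1) b 1).map (fun y => (xv, y))) q
  rw [List.foldl_map, List.map_map] at h
  simpa using h

theorem pass_x_init (orig : List (Int × Int)) (b yv : Int) :
    (PySem.List.pyRange (-1) b 1).foldl
      (fun cur x => tryRemove cur (get_closest x yv orig)) orig
    = orig.filter (fun c =>
        !(((PySem.List.pyRange (-1) b 1).map (fun x => get_closest x yv orig)).contains (some c))) := by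
  have h := pass_x orig b yv (fun _ => true)
  rw [List.filter_true] at h
  simpa using h

-- ===== VERDICT (by name: the statement is the Claim_ definition above) =====
theorem remove_infinite_spec : Claim_equal_remove_infinite := by
  intro coords _
  unfold Spec_remove_infinite remove_infinite remove_infinite_alt
  simp only []
  rw [pass_x_init coords 401 (-1), pass_x coords 401 401, pass_y coords 400 (-1),
    pass_y coords 400 401]
  apply List.filter_congr
  intro c _
  simp only [List.map_append, List.map_map, List.contains_append, Function.comp_def,
    Bool.not_or, Bool.and_assoc]
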